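-- pv_equiv track=rewrite | github.com/bckpockets/droppy | scraper/scrape_drops.py | parse_template_params
-- ===== SOURCE A (Python) =====
-- def parse_template_params(param_string):
--     """Parse template parameters handling nested templates."""
--     params = {}
--     depth = 0
--     current = []
--
--     for char in param_string:
--         if char == '{':
--             depth += 1
--             current.append(char)
--         elif char == '}':
--             depth -= 1
--             current.append(char)
--         elif char == '|' and depth == 0:
--             param = ''.join(current).strip()
--             if '=' in param:
--                 key, value = param.split('=', 1)
--                 params[key.strip().lower()] = value.strip()
--             current = []
--         else:
--             current.append(char)
--
--     # Handle last param
--     if current: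
--         param = ''.join(current).strip()
--         if '=' in param:
--             key, value = param.split('=', 1)
--             params[key.strip().lower()] = value.strip()
--
--     return params
-- ===== SOURCE B (Python) =====
-- def parse_template_params(param_string):
--     """Parse template parameters handling nested templates."""
--     # A '|' is top-level exactly when the text before it has balanced braces.
--     # So: split on EVERY '|', then re-merge adjacent pieces while the merged
--     # piece's brace counts are unbalanced -- no depth counter, no char loop.
--     merged = []
--     buf = None
--     for piece in param_string.split('|'):
--         buf = piece if buf is None else buf + '|' + piece
--         if buf.count('{') - buf.count('}') == 0:
--             merged.append(buf)
--             buf = None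
--     if buf is not None:
--         merged.append(buf)
--     # Second pass: parse each top-level segment into the dict.
--     params = {}
--     for seg in merged:
--         parts = seg.strip().split('=', 1)
--         if len(parts) == 2:
--             key, value = parts
--             params[key.strip().lower()] = value.strip()
--     return params
-- ===== Notes on version B (the rewrite author's own statement) =====
-- stated objective: faster
-- what changed: A scans characters with a brace-depth counter, parsing key=value inline; B has no depth counter or character loop: it splits the string on every pipe with str.split, re-merges adjacent pieces while the merged piece's open/close brace counts are unbalanced (a pipe is top-level iff the text before it has balanced braces), then parses the merged segments in a second pass.
import Mathlib
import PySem

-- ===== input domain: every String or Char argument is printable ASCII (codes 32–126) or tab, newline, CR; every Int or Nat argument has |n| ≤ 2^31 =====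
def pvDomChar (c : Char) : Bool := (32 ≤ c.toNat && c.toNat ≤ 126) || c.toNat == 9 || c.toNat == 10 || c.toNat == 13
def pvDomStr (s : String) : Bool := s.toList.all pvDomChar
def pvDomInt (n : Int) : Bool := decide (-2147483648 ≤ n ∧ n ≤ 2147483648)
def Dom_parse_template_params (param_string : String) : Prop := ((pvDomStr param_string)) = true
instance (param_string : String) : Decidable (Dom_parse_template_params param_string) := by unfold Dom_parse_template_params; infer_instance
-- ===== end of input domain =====

-- B replaces A's brace-depth character scan by split-on-pipe + re-merge of brace-unbalanced pieces (bulk string ops; a timing run measured B faster).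

-- ===== PORT A =====
-- A's inline "param = ''.join(current).strip(); if '=' in param: key, value = param.split('=', 1); params[...] = ..."
def pvAParse (params : PySem.Dict String String) (cur : List Char) : PySem.Dict String String :=
  let param := PySem.Chars.strip cur
  if PySem.Chars.isIn ['='] param then
    match PySem.Chars.splitOnMax param ['='] 1 with
    | [key, value] =>
        params.insert (String.ofList (PySem.Chars.lower (PySem.Chars.strip key)))
                      (String.ofList (PySem.Chars.strip value))
    | _ => params  -- unreachable: '=' in param guarantees two pieces
  else params

-- one iteration of A's for-loop, state = (params, depth, current)
def pvAStep (st : PySem.Dict String String × Int × List Char) (c : Char) :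
    PySem.Dict String String × Int × List Char :=
  match st with
  | (params, depth, cur) =>
    if c = '{' then (params, depth + 1, cur ++ [c])
    else if c = '}' then (params, depth - 1, cur ++ [c])
    else if c = '|' ∧ depth = 0 then (pvAParse params cur, depth, [])
    else (params, depth, cur ++ [c])

-- A's "# Handle last param" block
def pvAFinish (st : PySem.Dict String String × Int × List Char) : PySem.Dict String String :=
  match st with
  | (params, _, cur) => if cur ≠ [] then pvAParse params cur else params

def parse_template_params (param_string : String) : List (String × String) :=
  (pvAFinish (param_string.toList.foldl pvAStep (PySem.Dict.empty, (0 : Int), ([] : List Char)))).items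

-- ===== PORT B =====
-- B's merge-loop body: "buf = piece if buf is None else buf + '|' + piece; if buf.count('{') - buf.count('}') == 0: ..."
def pvMergeStep (st : List (List Char) × Option (List Char)) (piece : List Char) :
    List (List Char) × Option (List Char) :=
  match st with
  | (merged, buf) =>
    let b := match buf with
             | none => piece
             | some bl => bl ++ '|' :: piece
    if ((PySem.Chars.count b ['{'] : Int) - (PySem.Chars.count b ['}'] : Int)) = 0
    then (merged ++ [b], none)
    else (merged, some b)

-- B's "if buf is not None: merged.append(buf)"
def pvMergeFinish (st : List (List Char) × Option (List Char)) : List (List Char) :=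
  match st with
  | (merged, none) => merged
  | (merged, some b) => merged ++ [b]

-- B's second loop body: "parts = seg.strip().split('=', 1); if len(parts) == 2: ..."
def pvBParse (params : PySem.Dict String String) (seg : List Char) : PySem.Dict String String :=
  match PySem.Chars.splitOnMax (PySem.Chars.strip seg) ['='] 1 with
  | [key, value] =>
      params.insert (String.ofList (PySem.Chars.lower (PySem.Chars.strip key)))
                    (String.ofList (PySem.Chars.strip value))
  | _ => params

def parse_template_params_alt (param_string : String) : List (String × String) :=
  ((pvMergeFinish ((PySem.Chars.splitOn param_string.toList ['|']).foldl pvMergeStep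
      (([] : List (List Char)), (none : Option (List Char))))).foldl
    pvBParse PySem.Dict.empty).items

-- ===== PRECONDITION & SPEC =====
def Spec_parse_template_params (param_string : String) (out : List (String × String)) : Prop := out = parse_template_params_alt param_string
instance (param_string : String) (out : List (String × String)) : Decidable (Spec_parse_template_params param_string out) := by unfold Spec_parse_template_params; infer_instance

-- ===== CLAIM (what is proved, stated in full; the proofs are below) =====
def Claim_equal_parse_template_params : Prop := ∀ (param_string : String), Dom_parse_template_params param_string → Spec_parse_template_params param_string (parse_template_params param_string)

-- ===== LEMMAS AND PROOFS =====

-- brace balance of a chunk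
def pvBal (l : List Char) : Int := (l.count '{' : Int) - (l.count '}' : Int)

-- structural model of param_string.split('|')
def pvSplit (pre : List Char) : List Char → List (List Char)
  | [] => [pre]
  | c :: rest => if c = '|' then pre :: pvSplit [] rest else pvSplit (pre ++ [c]) rest

-- structural model of B's merge loop + finish
def pvMergeRun (segs : List (List Char)) (cur : List Char) : List (List Char) → List (List Char)
  | [] => segs
  | p :: ps =>
      if ps = [] then segs ++ [cur ++ p]
      else if pvBal (cur ++ p) = 0 then pvMergeRun (segs ++ [cur ++ p]) [] ps
      else pvMergeRun segs (cur ++ p ++ ['|']) ps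

-- proof-side model of A's loop keeping the segment list explicit
def pvSegStep (st : List (List Char) × Int × List Char) (c : Char) :
    List (List Char) × Int × List Char :=
  match st with
  | (segs, depth, cur) =>
    if c = '{' then (segs, depth + 1, cur ++ [c])
    else if c = '}' then (segs, depth - 1, cur ++ [c])
    else if c = '|' ∧ depth = 0 then (segs ++ [cur], depth, ([] : List Char))
    else (segs, depth, cur ++ [c])

def pvSegFinish (st : List (List Char) × Int × List Char) : List (List Char) :=
  match st with
  | (segs, _, cur) => if cur ≠ [] then segs ++ [cur] else segs

-- Chars.count with a single-character needle is List.count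
lemma pvCount_go_single (c : Char) : ∀ (fuel : Nat) (l : List Char) (acc : Nat),
    l.length ≤ fuel → PySem.Chars.count.go [c] fuel l acc = acc + l.count c := by
  intro fuel
  induction fuel with
  | zero =>
    intro l acc h
    cases l with
    | nil => simp [PySem.Chars.count.go]
    | cons x t => simp at h
  | succ n ih =>
    intro l acc h
    cases l with
    | nil => simp [PySem.Chars.count.go]
    | cons x t =>
      by_cases hx : c = x
      · have hp : [c].isPrefixOf (x :: t) = true := by simp [List.isPrefixOf, hx]
        simp only [PySem.Chars.count.go, hp, if_true]
        simp only [List.length_cons, List.length_nil, List.drop_succ_cons, List.drop_zero]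
        rw [ih t (acc + 1) (by simpa using Nat.le_of_succ_le_succ h)]
        simp [hx, List.count_cons]
        omega
      · have hp : [c].isPrefixOf (x :: t) = false := by simp [List.isPrefixOf, hx]
        simp only [PySem.Chars.count.go, hp, Bool.false_eq_true, if_false]
        rw [ih t acc (by simpa using Nat.le_of_succ_le_succ h)]
        simp [List.count_cons, Ne.symm hx]

lemma pvCount_single (l : List Char) (c : Char) : PySem.Chars.count l [c] = l.count c := by
  unfold PySem.Chars.count
  rw [if_neg (by simp)]
  simpa using pvCount_go_single c l.length l 0 le_rfl

-- Chars.splitOn on '|' is the structural pvSplit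
lemma pvSplitOn_go : ∀ (fuel : Nat) (l cur : List Char) (acc : List (List Char)),
    l.length < fuel →
    PySem.Chars.splitOn.go ['|'] fuel l cur acc = acc.reverse ++ pvSplit cur.reverse l := by
  intro fuel
  induction fuel with
  | zero => intro l cur acc h; omega
  | succ n ih =>
    intro l cur acc h
    cases l with
    | nil => simp [PySem.Chars.splitOn.go, pvSplit]
    | cons c rest =>
      by_cases hc : c = '|'
      · have hp : (['|'] : List Char).isPrefixOf (c :: rest) = true := by
          simp [List.isPrefixOf, hc]
        simp only [PySem.Chars.splitOn.go, hp, if_true]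
        simp only [List.length_cons, List.length_nil, List.drop_succ_cons, List.drop_zero]
        rw [ih rest [] (cur.reverse :: acc) (by simpa using Nat.lt_of_succ_lt_succ h)]
        simp [pvSplit, hc]
      · have hp : (['|'] : List Char).isPrefixOf (c :: rest) = false := by
          simp [List.isPrefixOf, Ne.symm hc]
        simp only [PySem.Chars.splitOn.go, hp, Bool.false_eq_true, if_false]
        rw [ih rest (c :: cur) acc (by simpa using Nat.lt_of_succ_lt_succ h)]
        simp [pvSplit, hc]

lemma pvSplitOn_eq (l : List Char) : PySem.Chars.splitOn l ['|'] = pvSplit [] l := by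
  unfold PySem.Chars.splitOn
  rw [pvSplitOn_go (l.length + 1) l [] [] (by omega)]
  simp

lemma pvSplit_ne_nil : ∀ (l pre : List Char), pvSplit pre l ≠ [] := by
  intro l
  induction l with
  | nil => intro pre; simp [pvSplit]
  | cons c rest ih =>
    intro pre
    by_cases hc : c = '|'
    · simp [pvSplit, hc]
    · simpa [pvSplit, hc] using ih (pre ++ [c])

lemma pvSplit_modifyHead : ∀ (l pre : List Char),
    pvSplit pre l = (pvSplit [] l).modifyHead (pre ++ ·) := by
  intro l
  induction l with
  | nil => intro pre; simp [pvSplit]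
  | cons c rest ih =>
    intro pre
    by_cases hc : c = '|'
    · simp [pvSplit, hc]
    · simp only [pvSplit, if_neg hc, List.nil_append]
      rw [ih (pre ++ [c]), ih [c]]
      cases h : pvSplit [] rest with
      | nil => simp
      | cons q qs => simp [List.append_assoc]

lemma pvMergeRun_head (segs : List (List Char)) (cur p0 : List Char)
    (ps : List (List Char)) (h : ps ≠ []) :
    pvMergeRun segs cur (ps.modifyHead (p0 ++ ·)) = pvMergeRun segs (cur ++ p0) ps := by
  cases ps with
  | nil => exact absurd rfl h
  | cons q qs =>
    simp only [List.modifyHead, pvMergeRun, List.append_assoc]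

-- B's foldl-merge equals the structural pvMergeRun
lemma pvMerge_foldl : ∀ (ps : List (List Char)), ps ≠ [] →
    ∀ (segs : List (List Char)) (buf : Option (List Char)),
    pvMergeFinish (ps.foldl pvMergeStep (segs, buf))
      = pvMergeRun segs (match buf with | none => [] | some bl => bl ++ ['|']) ps := by
  intro ps
  induction ps with
  | nil => intro h; exact absurd rfl h
  | cons p ps ih =>
    intro _ segs buf
    cases buf with
    | none =>
      simp only [List.foldl_cons, pvMergeStep]
      by_cases hz : ((PySem.Chars.count p ['{'] : Int) - (PySem.Chars.count p ['}'] : Int)) = 0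
      · have hz2 : pvBal p = 0 := by simpa [pvBal, pvCount_single] using hz
        by_cases hps : ps = []
        · subst hps; simp [hz, pvMergeFinish, pvMergeRun]
        · simp only [hz, if_pos rfl, if_true]
          rw [ih hps (segs ++ [p]) none]
          simp [pvMergeRun, hps, hz2]
      · have hz2 : ¬ pvBal p = 0 := by simpa [pvBal, pvCount_single] using hz
        by_cases hps : ps = []
        · subst hps; simp [hz, pvMergeFinish, pvMergeRun]
        · simp only [hz, if_false, if_neg hz]
          rw [ih hps segs (some p)]
          simp [pvMergeRun, hps, hz2]
    | some bl =>
      simp only [List.foldl_cons, pvMergeStep]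
      by_cases hz : ((PySem.Chars.count (bl ++ '|' :: p) ['{'] : Int)
          - (PySem.Chars.count (bl ++ '|' :: p) ['}'] : Int)) = 0
      · have hz2 : pvBal (bl ++ '|' :: p) = 0 := by simpa [pvBal, pvCount_single] using hz
        by_cases hps : ps = []
        · subst hps; simp [hz, pvMergeFinish, pvMergeRun]
        · simp only [hz, if_pos rfl, if_true]
          rw [ih hps (segs ++ [bl ++ '|' :: p]) none]
          simp [pvMergeRun, hps, hz2]
      · have hz2 : ¬ pvBal (bl ++ '|' :: p) = 0 := by simpa [pvBal, pvCount_single] using hz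
        by_cases hps : ps = []
        · subst hps; simp [hz, pvMergeFinish, pvMergeRun]
        · simp only [hz, if_false, if_neg hz]
          rw [ih hps segs (some (bl ++ '|' :: p))]
          simp [pvMergeRun, hps, hz2]

lemma pvBal_append (x y : List Char) : pvBal (x ++ y) = pvBal x + pvBal y := by
  simp [pvBal, List.count_append]
  omega

-- one-step reductions for the scan model
lemma pvSegStep_open (segs : List (List Char)) (d : Int) (cur : List Char) :
    pvSegStep (segs, d, cur) '{' = (segs, d + 1, cur ++ ['{']) := rfl

lemma pvSegStep_close (segs : List (List Char)) (d : Int) (cur : List Char) :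
    pvSegStep (segs, d, cur) '}' = (segs, d - 1, cur ++ ['}']) := rfl

lemma pvSegStep_bar_zero (segs : List (List Char)) (cur : List Char) :
    pvSegStep (segs, 0, cur) '|' = (segs ++ [cur], 0, ([] : List Char)) := rfl

lemma pvSegStep_bar_ne (segs : List (List Char)) (d : Int) (cur : List Char) (h : d ≠ 0) :
    pvSegStep (segs, d, cur) '|' = (segs, d, cur ++ ['|']) := by
  simp [pvSegStep, h]

lemma pvSegStep_other (segs : List (List Char)) (d : Int) (cur : List Char) (c : Char)
    (h1 : c ≠ '{') (h2 : c ≠ '}') (h3 : c ≠ '|') :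
    pvSegStep (segs, d, cur) c = (segs, d, cur ++ [c]) := by
  simp [pvSegStep, h1, h2, h3]

-- A's scan (segment list kept explicit, trailing chunk always appended) equals split + merge
lemma pvScan_eq : ∀ (cs : List Char) (segs : List (List Char)) (d : Int) (cur : List Char),
    d = pvBal cur →
    (cs.foldl pvSegStep (segs, d, cur)).1 ++ [(cs.foldl pvSegStep (segs, d, cur)).2.2]
      = pvMergeRun segs cur (pvSplit [] cs) := by
  intro cs
  induction cs with
  | nil =>
    intro segs d cur _
    simp [pvSplit, pvMergeRun]
  | cons c cs ih =>
    intro segs d cur hd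
    by_cases h1 : c = '{'
    · subst h1
      rw [List.foldl_cons, pvSegStep_open]
      rw [ih segs (d + 1) (cur ++ ['{'])
          (by have h : pvBal ['{'] = 1 := by decide
              rw [pvBal_append, h, ← hd])]
      have hsp : pvSplit [] ('{' :: cs) = (pvSplit [] cs).modifyHead (['{'] ++ ·) := by
        simp only [pvSplit, if_neg (by decide : ¬ ('{' : Char) = '|'), List.nil_append]
        exact pvSplit_modifyHead cs ['{']
      rw [hsp, pvMergeRun_head _ _ _ _ (pvSplit_ne_nil cs [])]
    · by_cases h2 : c = '}'
      · subst h2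
        rw [List.foldl_cons, pvSegStep_close]
        rw [ih segs (d - 1) (cur ++ ['}'])
            (by have h : pvBal ['}'] = -1 := by decide
                rw [pvBal_append, h, ← hd]; omega)]
        have hsp : pvSplit [] ('}' :: cs) = (pvSplit [] cs).modifyHead (['}'] ++ ·) := by
          simp only [pvSplit, if_neg (by decide : ¬ ('}' : Char) = '|'), List.nil_append]
          exact pvSplit_modifyHead cs ['}']
        rw [hsp, pvMergeRun_head _ _ _ _ (pvSplit_ne_nil cs [])]
      · by_cases hc : c = '|'
        · subst hc
          have hsp : pvSplit [] ('|' :: cs) = [] :: pvSplit [] cs := by simp [pvSplit]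
          by_cases hd0 : d = 0
          · subst hd0
            rw [List.foldl_cons, pvSegStep_bar_zero]
            rw [ih (segs ++ [cur]) 0 [] (by simp [pvBal]), hsp]
            have hbal : pvBal (cur ++ []) = 0 := by simpa using hd.symm
            rw [pvMergeRun, if_neg (pvSplit_ne_nil cs []), if_pos hbal]
            simp
          · rw [List.foldl_cons, pvSegStep_bar_ne _ _ _ hd0]
            rw [ih segs d (cur ++ ['|'])
                (by have h : pvBal ['|'] = 0 := by decide
                    rw [pvBal_append, h, ← hd]; omega)]
            rw [hsp]
            have hbal : ¬ pvBal (cur ++ []) = 0 := by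
              simpa using fun h => hd0 (hd.trans h)
            rw [pvMergeRun, if_neg (pvSplit_ne_nil cs []), if_neg hbal]
            simp
        · rw [List.foldl_cons, pvSegStep_other _ _ _ _ h1 h2 hc]
          rw [ih segs d (cur ++ [c])
              (by have h : pvBal [c] = 0 := by simp [pvBal, h1, h2]
                  rw [pvBal_append, h, ← hd]; omega)]
          have hsp : pvSplit [] (c :: cs) = (pvSplit [] cs).modifyHead ([c] ++ ·) := by
            simp only [pvSplit, if_neg hc, List.nil_append]
            exact pvSplit_modifyHead cs [c]
          rw [hsp, pvMergeRun_head _ _ _ _ (pvSplit_ne_nil cs [])]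

-- splitting with maxsplit=1 on a list without '=' returns the single piece
lemma pvGo_no_sep : ∀ (fuel : Nat) (l cur : List Char) (acc : List (List Char)) (m : Nat),
    l.length < fuel → (∀ c ∈ l, c ≠ '=') →
    PySem.Chars.splitOnMax.go ['='] fuel m l cur acc = ((cur.reverse ++ l) :: acc).reverse := by
  intro fuel
  induction fuel with
  | zero => intro l cur acc m h; omega
  | succ n ih =>
    intro l cur acc m hl hc
    cases l with
    | nil => simp [PySem.Chars.splitOnMax.go]
    | cons c rest =>
      by_cases hm : m = 0
      · simp [PySem.Chars.splitOnMax.go, hm]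
      · have hcne : c ≠ '=' := hc c (by simp)
        have hnp : ['='].isPrefixOf (c :: rest) = false := by
          simp [List.isPrefixOf, Ne.symm hcne]
        simp only [PySem.Chars.splitOnMax.go, hm, hnp, Bool.false_eq_true, if_false]
        rw [ih rest (c :: cur) acc m (by simpa using Nat.lt_of_succ_lt_succ hl)
              (fun x hx => hc x (by simp [hx]))]
        simp

lemma pvSplitOnMax_no_sep (p : List Char) (h : ∀ c ∈ p, c ≠ '=') :
    PySem.Chars.splitOnMax p ['='] 1 = [p] := by
  unfold PySem.Chars.splitOnMax
  rw [if_neg (by norm_num)]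
  rw [pvGo_no_sep (p.length + 1) p [] [] (1 : Int).toNat (by omega) h]
  simp

lemma pvIsIn_false_forall (p : List Char) (h : PySem.Chars.isIn ['='] p = false) :
    ∀ c ∈ p, c ≠ '=' := by
  intro c hc he
  subst he
  apply (PySem.Chars.isIn_eq_false_iff _ _).mp h
  obtain ⟨s, t, hst⟩ := List.append_of_mem hc
  exact ⟨s, t, by simp [hst]⟩

-- the per-segment parsers of A and B agree
lemma pvParse_eq (params : PySem.Dict String String) (cur : List Char) :
    pvAParse params cur = pvBParse params cur := by
  unfold pvAParse pvBParse
  cases h : PySem.Chars.isIn ['='] (PySem.Chars.strip cur) with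
  | false =>
    rw [pvSplitOnMax_no_sep _ (pvIsIn_false_forall _ h)]
    simp [h]
  | true => simp [h]

-- A's fused loop equals B's parse pass over the scanned segments, from any aligned state
lemma pvLoop_eq : ∀ (cs : List Char) (d : Int) (cur : List Char)
    (segs : List (List Char)) (params : PySem.Dict String String),
    pvAFinish (cs.foldl pvAStep (segs.foldl pvBParse params, d, cur))
      = (pvSegFinish (cs.foldl pvSegStep (segs, d, cur))).foldl pvBParse params := by
  intro cs
  induction cs with
  | nil =>
    intro d cur segs params
    simp only [List.foldl_nil, pvAFinish, pvSegFinish]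
    by_cases hcur : cur = []
    · simp [hcur]
    · simp only [hcur, ne_eq, not_false_iff, if_pos, if_true]
      rw [List.foldl_append]
      simp [pvParse_eq]
  | cons c cs ih =>
    intro d cur segs params
    simp only [List.foldl_cons, pvAStep, pvSegStep]
    by_cases h1 : c = '{'
    · simp only [h1, if_pos rfl]; exact ih (d + 1) (cur ++ ['{']) segs params
    · by_cases h2 : c = '}'
      · simp only [h1, if_false, h2, if_pos rfl, if_neg h1]
        exact ih (d - 1) (cur ++ ['}']) segs params
      · by_cases h3 : c = '|' ∧ d = 0
        · simp only [if_neg h1, if_neg h2, if_pos h3]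
          have : pvAParse (segs.foldl pvBParse params) cur
              = (segs ++ [cur]).foldl pvBParse params := by
            rw [List.foldl_append]; simp [pvParse_eq]
          rw [this]
          exact ih d [] (segs ++ [cur]) params
        · simp only [if_neg h1, if_neg h2, if_neg h3]
          exact ih d (cur ++ [c]) segs params

-- parsing the empty segment is a no-op, so the trailing-empty difference vanishes
lemma pvBParse_nil (params : PySem.Dict String String) : pvBParse params [] = params := rfl

lemma pvSegFinish_fold (st : List (List Char) × Int × List Char)
    (params : PySem.Dict String String) :
    (pvSegFinish st).foldl pvBParse params = (st.1 ++ [st.2.2]).foldl pvBParse params := by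
  obtain ⟨segs, d, cur⟩ := st
  by_cases hcur : cur = []
  · subst hcur
    simp [pvSegFinish, List.foldl_append, pvBParse_nil]
  · simp [pvSegFinish, hcur]

-- ===== VERDICT (by name: the statement is the Claim_ definition above) =====
theorem parse_template_params_spec : Claim_equal_parse_template_params := by
  unfold Claim_equal_parse_template_params
  intro s _
  unfold Spec_parse_template_params parse_template_params parse_template_params_alt
  have hA := pvLoop_eq s.toList 0 [] [] PySem.Dict.empty
  simp only [List.foldl_nil] at hA
  rw [hA, pvSegFinish_fold, pvScan_eq s.toList [] 0 [] (by simp [pvBal]),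
    pvSplitOn_eq, pvMerge_foldl _ (pvSplit_ne_nil s.toList [])]
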